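-- pv_equiv track=rewrite | github.com/benquick123/code-profiling | code/batch-2/vse-naloge-brez-testov/DN4-M-056.py | koordinate
-- ===== SOURCE A (Python) =====
-- def koordinate(ime, kraji):
--     i = 0
--     for im,x,y in kraji:
--         if im == ime:
--             i = 1
--             terka = (x,y)
--     if i == 1:
--         return(terka)
--     else:
--         return None
-- ===== SOURCE B (Python) =====
-- def koordinate(ime, kraji):
--     for im, x, y in reversed(kraji):
--         if im == ime:
--             return (x, y)
--     return None
-- ===== Notes on version B (the rewrite author's own statement) =====
-- stated objective: simpler
-- what changed: B scans the list in reverse and returns the first match immediately, instead of sweeping the whole list forward while overwriting a flag and an accumulator.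
import Mathlib
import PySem

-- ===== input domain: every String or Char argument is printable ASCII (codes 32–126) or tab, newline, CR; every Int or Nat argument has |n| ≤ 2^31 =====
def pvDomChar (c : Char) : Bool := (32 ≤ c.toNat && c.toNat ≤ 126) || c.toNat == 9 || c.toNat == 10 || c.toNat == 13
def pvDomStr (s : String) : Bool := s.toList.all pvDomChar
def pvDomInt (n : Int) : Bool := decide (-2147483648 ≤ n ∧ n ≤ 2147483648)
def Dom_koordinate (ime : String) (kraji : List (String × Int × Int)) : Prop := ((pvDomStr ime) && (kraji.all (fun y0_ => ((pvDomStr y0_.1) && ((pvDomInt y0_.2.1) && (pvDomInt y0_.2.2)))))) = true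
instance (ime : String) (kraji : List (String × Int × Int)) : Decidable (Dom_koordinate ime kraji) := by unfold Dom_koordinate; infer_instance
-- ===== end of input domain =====

-- B replaces A's full forward sweep with flag+accumulator by an early-exit reverse scan (objective: simpler).


-- ===== PORT A =====
-- A keeps a flag i and an accumulator terka; terka is unbound until the first
-- match, so the state is (i, Option pair) — terka is only read when i = 1.
def koordinate (ime : String) (kraji : List (String × Int × Int)) : Option (Int × Int) :=
  let st := kraji.foldl
    (fun (st : Int × Option (Int × Int)) p =>
      if p.1 == ime then (1, some (p.2.1, p.2.2)) else st)
    (0, none)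
  if st.1 == 1 then st.2 else none

-- ===== PORT B =====
-- first match while walking the reversed list
def koordRev (ime : String) : List (String × Int × Int) → Option (Int × Int)
  | [] => none
  | p :: rest => if p.1 == ime then some (p.2.1, p.2.2) else koordRev ime rest

def koordinate_alt (ime : String) (kraji : List (String × Int × Int)) : Option (Int × Int) :=
  koordRev ime kraji.reverse

-- ===== PRECONDITION & SPEC =====
def Spec_koordinate (ime : String) (kraji : List (String × Int × Int)) (out : Option (Int × Int)) : Prop := out = koordinate_alt ime kraji
instance (ime : String) (kraji : List (String × Int × Int)) (out : Option (Int × Int)) : Decidable (Spec_koordinate ime kraji out) := by unfold Spec_koordinate; infer_instance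

-- ===== CLAIM (what is proved, stated in full; the proofs are below) =====
def Claim_equal_koordinate : Prop := ∀ (ime : String) (kraji : List (String × Int × Int)), Dom_koordinate ime kraji → Spec_koordinate ime kraji (koordinate ime kraji)

-- ===== LEMMAS AND PROOFS =====

theorem koordRev_append (ime : String) (a b : List (String × Int × Int)) :
    koordRev ime (a ++ b) = match koordRev ime a with
      | some v => some v
      | none => koordRev ime b := by
  induction a with
  | nil => simp [koordRev]
  | cons p t ih =>
    simp only [List.cons_append, koordRev]
    by_cases h : p.1 == ime <;> simp [h, ih]

-- A's fold-then-extract over l with any start state equals: B's reverse scan of l,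
-- falling back to extracting the start state.
theorem foldA_eq (ime : String) (l : List (String × Int × Int)) :
    ∀ s : Int × Option (Int × Int),
      (let st := l.foldl
        (fun (st : Int × Option (Int × Int)) p =>
          if p.1 == ime then (1, some (p.2.1, p.2.2)) else st) s
       if st.1 == 1 then st.2 else none)
      = match koordRev ime l.reverse with
        | some v => some v
        | none => if s.1 == 1 then s.2 else none := by
  induction l with
  | nil => intro s; simp [koordRev]
  | cons p t ih =>
    intro s
    simp only [List.foldl_cons, List.reverse_cons, koordRev_append ime t.reverse [p]]
    rw [ih]
    by_cases h : p.1 == ime <;>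
      cases hk : koordRev ime t.reverse <;> simp [koordRev, h]

-- ===== VERDICT (by name: the statement is the Claim_ definition above) =====
theorem koordinate_spec : Claim_equal_koordinate := by
  intro ime kraji _
  unfold Spec_koordinate koordinate koordinate_alt
  have := foldA_eq ime kraji (0, none)
  simp only at this
  rw [this]
  cases hk : koordRev ime kraji.reverse <;> simp
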